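-- pv_equiv track=rewrite | github.com/kirinnsan/checkio-training | AliceInWonderland/zigzag-array.py | create_zigzag
-- ===== SOURCE A (Python) =====
-- from typing import List
--
-- def create_zigzag(rows: int, cols: int, start: int = 1) -> List[List[int]]:
--     _start = start
--     result = []
--     # 指定の行列を作成
--     for _ in range(rows):
--         row = [num for num in range(_start, _start + cols)]
--         result.append(row)
--         _start += cols
--     # 奇数列を降順にソート
--     result = [row if i % 2 == 0 else sorted(row, reverse=True)
--               for i, row in enumerate(result)]
--     return result
-- ===== SOURCE B (Python) =====
-- def create_zigzag(rows: int, cols: int, start: int = 1):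
--     # Closed form: the value at (i, j) is start + i*cols + (j if i is even
--     # else cols-1-j). No running offset, no row reversal/sort pass.
--     return [[start + i * cols + (j if i % 2 == 0 else cols - 1 - j)
--              for j in range(cols)]
--             for i in range(rows)]
-- ===== Notes on version B (the rewrite author's own statement) =====
-- stated objective: alternative
-- what changed: A builds ascending rows with a running offset and then reverse-sorts odd rows in a second enumerate pass; B computes every cell independently by the closed-form index formula start + i*cols + (j if i even else cols-1-j), with no running state and no reversal/sort.
import Mathlib
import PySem

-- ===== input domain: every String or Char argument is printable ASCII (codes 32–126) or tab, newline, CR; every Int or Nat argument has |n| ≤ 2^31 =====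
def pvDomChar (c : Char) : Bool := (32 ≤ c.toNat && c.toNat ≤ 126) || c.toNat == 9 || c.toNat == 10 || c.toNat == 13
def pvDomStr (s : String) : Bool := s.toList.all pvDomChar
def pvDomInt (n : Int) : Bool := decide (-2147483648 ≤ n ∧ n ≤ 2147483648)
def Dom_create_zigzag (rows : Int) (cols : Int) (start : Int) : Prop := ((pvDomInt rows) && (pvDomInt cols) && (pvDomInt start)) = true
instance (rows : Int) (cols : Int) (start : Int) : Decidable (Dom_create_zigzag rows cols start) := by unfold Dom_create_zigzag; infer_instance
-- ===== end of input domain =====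

-- B computes each cell by the closed-form index formula start + i*cols + (j if i even
-- else cols-1-j) instead of A's running-offset build followed by a reverse-sort pass.

-- ===== PORT A =====
-- two passes: build ascending rows with a running offset, then reverse-sort odd-indexed rows
def create_zigzag (rows : Int) (cols : Int) (start : Int) : List (List Int) :=
  let built := (PySem.List.pyRange 0 rows 1).foldl
    (fun (st : List (List Int) × Int) _ =>
      (st.1 ++ [PySem.List.pyRange st.2 (st.2 + cols) 1], st.2 + cols))
    ([], start)
  (PySem.List.enumerate built.1 0).map
    (fun p => if PySem.Int.mod p.1 2 = 0 then p.2
              else PySem.List.sorted p.2 (fun x => x) true)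

-- ===== PORT B =====
-- closed form: nested comprehension over indices, value at (i, j) computed directly
def create_zigzag_alt (rows : Int) (cols : Int) (start : Int) : List (List Int) :=
  (PySem.List.pyRange 0 rows 1).map (fun i =>
    (PySem.List.pyRange 0 cols 1).map (fun j =>
      start + i * cols + (if PySem.Int.mod i 2 = 0 then j else cols - 1 - j)))

-- ===== PRECONDITION & SPEC =====
def Spec_create_zigzag (rows : Int) (cols : Int) (start : Int) (out : List (List Int)) : Prop := out = create_zigzag_alt rows cols start
instance (rows : Int) (cols : Int) (start : Int) (out : List (List Int)) : Decidable (Spec_create_zigzag rows cols start out) := by unfold Spec_create_zigzag; infer_instance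

-- ===== CLAIM (what is proved, stated in full; the proofs are below) =====
def Claim_equal_create_zigzag : Prop := ∀ (rows : Int) (cols : Int) (start : Int), Dom_create_zigzag rows cols start → Spec_create_zigzag rows cols start (create_zigzag rows cols start)

-- ===== LEMMAS AND PROOFS =====

-- A's build loop produces exactly the ascending rows at offsets s + k*cols.
theorem zz_buildA (cols : Int) (n : Nat) (s : Int) (acc : List (List Int)) :
    (List.range n).foldl
      (fun (st : List (List Int) × Int) (_ : Nat) =>
        (st.1 ++ [PySem.List.pyRange st.2 (st.2 + cols) 1], st.2 + cols))
      (acc, s)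
    = (acc ++ (List.range n).map
        (fun (k : Nat) => PySem.List.pyRange (s + (k : Int) * cols) (s + (k : Int) * cols + cols) 1),
       s + (n : Int) * cols) := by
  induction n with
  | zero => simp
  | succ n ih =>
      rw [List.range_succ, List.foldl_append, ih, List.map_append]
      simp only [List.foldl_cons, List.foldl_nil, List.map_cons, List.map_nil, List.append_assoc,
        Prod.mk.injEq]
      exact ⟨trivial, by push_cast; ring⟩

-- enumerating a range-indexed list and mapping g is a map over the range itself
theorem zz_enum_map (g : Int × List Int → List Int) (n : Nat) (f : Nat → List Int) (e : Int) :
    (PySem.List.enumerate ((List.range n).map f) e).map g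
    = (List.range n).map (fun (k : Nat) => g (e + (k : Int), f k)) := by
  induction n generalizing f e with
  | zero => simp
  | succ n ih =>
      rw [List.range_succ_eq_map]
      simp only [List.map_cons, List.map_map, PySem.List.enumerate_cons]
      rw [ih (f ∘ Nat.succ) (e + 1)]
      congr 1
      · norm_num
      · apply List.map_congr_left
        intro k _
        simp only [Function.comp_apply, Nat.succ_eq_add_one]
        congr 2
        push_cast; ring

-- reverse-sorting an ascending range is the corresponding descending range
theorem zz_sorted_rev (a b : Int) :
    PySem.List.sorted (PySem.List.pyRange a b 1) (fun x => x) true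
    = PySem.List.pyRange (b - 1) (a - 1) (-1) := by
  have h : PySem.List.pyRange (b - 1) (a - 1) (-1)
      = (PySem.List.pyRange a b 1).reverse := by
    rw [PySem.List.pyRange_neg_one_eq_reverse]
    congr 2 <;> ring
  rw [h]
  exact PySem.List.sorted_rev_eq_of_perm_of_pairwise_gt _ _ _
    (List.reverse_perm _)
    (by rw [List.pairwise_reverse]; exact PySem.List.pairwise_lt_pyRange_one a b)

-- an ascending range written as a shifted map of range(0, cols)
theorem zz_asc_map (a cols : Int) :
    PySem.List.pyRange a (a + cols) 1
    = (PySem.List.pyRange 0 cols 1).map (fun j => a + j) := by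
  rw [PySem.List.pyRange_one, PySem.List.pyRange_one, List.map_map]
  simp

-- a descending range written as a mirrored map of range(0, cols)
theorem zz_desc_map (a cols : Int) :
    PySem.List.pyRange (a + cols - 1) (a - 1) (-1)
    = (PySem.List.pyRange 0 cols 1).map (fun j => a + (cols - 1 - j)) := by
  rw [PySem.List.pyRange_neg_one, PySem.List.pyRange_one, List.map_map]
  have : (a + cols - 1 - (a - 1)) = cols := by ring
  rw [this]
  simp only [Int.sub_zero]
  apply List.map_congr_left
  intro k _
  simp only [Function.comp_apply]
  ring

-- ===== VERDICT (by name: the statement is the Claim_ definition above) =====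
theorem create_zigzag_spec : Claim_equal_create_zigzag := by
  intro rows cols start _
  unfold Spec_create_zigzag create_zigzag create_zigzag_alt
  rw [PySem.List.pyRange_one 0 rows]
  rw [List.foldl_map, List.map_map]
  rw [zz_buildA]
  simp only [List.nil_append]
  rw [zz_enum_map]
  apply List.map_congr_left
  intro k _
  simp only [Function.comp_apply]
  by_cases h : PySem.Int.mod (0 + (k : Int)) 2 = 0
  · simp only [if_pos h]
    rw [zz_asc_map]
    apply List.map_congr_left; intro j _; ring
  · simp only [if_neg h]
    rw [zz_sorted_rev]
    have : (start + (k : Int) * cols + cols - 1) = (start + (k : Int) * cols) + cols - 1 := by ring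
    rw [show (start + (k : Int) * cols + cols - 1 : Int) = (start + (k : Int) * cols) + cols - 1 from by ring,
        zz_desc_map]
    apply List.map_congr_left; intro j _; ring
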